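-- pv_equiv track=rewrite | github.com/moon088/ALL_CODE | 大学コード/プロジェクト課題自分/calculate_continuous_feature.py | count_consecutive_sets
-- ===== SOURCE A (Python) =====
-- def count_consecutive_sets(hand, n):
--     count = 0
--     i = 0
--     while i <= len(hand) - n:
--         if all(hand[i + j] == hand[i] + j for j in range(n)):
--             count += 1
--             i += n  # Skip the next 'n-1' tiles as they are part of the current set
--         else:
--             i += 1
--     return count
-- ===== SOURCE B (Python) =====
-- def count_consecutive_sets(hand, n):
--     count = 0
--     run = 1
--     for k in range(1, len(hand)):
--         if hand[k] == hand[k - 1] + 1: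
--             run += 1
--         else:
--             count += run // n
--             run = 1
--     if hand:
--         count += run // n
--     return count
-- ===== Notes on version B (the rewrite author's own statement) =====
-- stated objective: faster
-- what changed: Replaces the O(L*n) greedy index loop that re-checks an n-element window at each position with a single O(L) pass over maximal +1 segments, adding floor(segment_length/n) at each segment break.
import Mathlib
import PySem

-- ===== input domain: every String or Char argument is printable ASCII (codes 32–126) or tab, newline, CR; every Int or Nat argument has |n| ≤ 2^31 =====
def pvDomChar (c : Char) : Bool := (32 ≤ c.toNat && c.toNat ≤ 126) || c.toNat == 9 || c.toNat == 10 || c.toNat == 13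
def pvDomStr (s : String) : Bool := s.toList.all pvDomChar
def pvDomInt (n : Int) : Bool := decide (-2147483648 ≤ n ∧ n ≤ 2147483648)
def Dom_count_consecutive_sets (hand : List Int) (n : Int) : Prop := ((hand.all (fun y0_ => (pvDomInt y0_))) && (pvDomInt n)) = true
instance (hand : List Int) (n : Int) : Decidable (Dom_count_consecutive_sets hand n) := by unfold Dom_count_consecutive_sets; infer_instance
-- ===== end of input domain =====

-- B replaces A's O(L*n) greedy window-rechecking loop by a single O(L) pass over
-- maximal +1 segments, adding floor(segment_length/n) at each segment break.

-- ===== PORT A =====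
-- the 'all(hand[i+j] == hand[i] + j for j in range(n))' window check; under the loop
-- guard (0 ≤ i ≤ len-n, 0 ≤ j < n) every index is in range, so the pyGetD default 0
-- is never consulted on inputs admitted by Pre_.
def pvCheckA (hand : List Int) (n i : Int) : Bool :=
  (PySem.List.pyRange 0 n 1).all
    (fun j => PySem.List.pyGetD hand (i + j) 0 == PySem.List.pyGetD hand i 0 + j)

-- the while loop; fuel hand.length + 1 suffices since i strictly increases (n ≥ 1 by Pre_)
def pvGoA (hand : List Int) (n : Int) : Nat → Int → Int → Int
  | 0, _, count => count
  | fuel + 1, i, count =>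
    if i ≤ (hand.length : Int) - n then
      if pvCheckA hand n i then pvGoA hand n fuel (i + n) (count + 1)
      else pvGoA hand n fuel (i + 1) count
    else count

def count_consecutive_sets (hand : List Int) (n : Int) : Int :=
  pvGoA hand n (hand.length + 1) 0 0

-- ===== PORT B =====
-- the for-loop of Source B: prev is hand[k-1], run the length of the current +1 segment
def pvGoB (n prev : Int) (rest : List Int) (run count : Int) : Int :=
  match rest with
  | [] => count + PySem.Int.floordiv run n
  | x :: xs =>
    if x == prev + 1 then pvGoB n x xs (run + 1) count
    else pvGoB n x xs 1 (count + PySem.Int.floordiv run n)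

def count_consecutive_sets_alt (hand : List Int) (n : Int) : Int :=
  match hand with
  | [] => 0
  | x :: xs => pvGoB n x xs 1 0

-- ===== PRECONDITION & SPEC =====
-- A's while loop never terminates when n ≤ 0 (i never passes len(hand) - n), so A
-- returns only for n ≥ 1; Pre_ excludes exactly those diverging inputs.
def Pre_count_consecutive_sets (hand : List Int) (n : Int) : Prop := 1 ≤ n
instance (hand : List Int) (n : Int) : Decidable (Pre_count_consecutive_sets hand n) := by
  unfold Pre_count_consecutive_sets; infer_instance

def pvWitness_count_consecutive_sets : List Int × Int := ([3, 4, 5, 9, 1, 2, 3], 3)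

def Spec_count_consecutive_sets (hand : List Int) (n : Int) (out : Int) : Prop :=
  out = count_consecutive_sets_alt hand n
instance (hand : List Int) (n : Int) (out : Int) : Decidable (Spec_count_consecutive_sets hand n out) := by
  unfold Spec_count_consecutive_sets; infer_instance

-- ===== CLAIM (what is proved, stated in full; the proofs are below) =====
def Claim_equal_count_consecutive_sets : Prop := ∀ (hand : List Int) (n : Int), Dom_count_consecutive_sets hand n → Pre_count_consecutive_sets hand n → Spec_count_consecutive_sets hand n (count_consecutive_sets hand n)

-- ===== LEMMAS AND PROOFS =====

-- length of the maximal +1 run at the head of a list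
def pvRl : List Int → Nat
  | [] => 0
  | [_] => 1
  | x :: y :: t => if y = x + 1 then pvRl (y :: t) + 1 else 1

theorem pvRl_pos (x : Int) (t : List Int) : 1 ≤ pvRl (x :: t) := by
  cases t with
  | nil => simp [pvRl]
  | cons y t => simp only [pvRl]; split <;> omega

theorem pvRl_le_length : ∀ (l : List Int), pvRl l ≤ l.length := by
  intro l
  induction l with
  | nil => simp [pvRl]
  | cons x t ih =>
    cases t with
    | nil => simp [pvRl]
    | cons y t' => simp only [pvRl, List.length_cons] at *; split <;> omega


theorem pvRl_getD : ∀ (l : List Int) (k : Nat), k < pvRl l → l.getD k 0 = l.getD 0 0 + k := by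
  intro l
  induction l with
  | nil => intro k hk; simp [pvRl] at hk
  | cons x t ih =>
    intro k hk
    cases t with
    | nil =>
      simp only [pvRl] at hk
      have : k = 0 := by omega
      subst this; simp
    | cons y t' =>
      rw [pvRl] at hk
      by_cases hy : y = x + 1
      · rw [if_pos hy] at hk
        cases k with
        | zero => simp
        | succ k' =>
          have h := ih k' (by omega)
          rw [List.getD_cons_succ, h]
          simp only [List.getD_cons_zero, hy]
          push_cast; ring
      · rw [if_neg hy] at hk
        have : k = 0 := by omega
        subst this; simp


theorem pvRl_break : ∀ (l : List Int), pvRl l < l.length →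
    l.getD (pvRl l) 0 ≠ l.getD (pvRl l - 1) 0 + 1 := by
  intro l
  induction l with
  | nil => simp [pvRl]
  | cons x t ih =>
    intro hlt
    cases t with
    | nil => simp [pvRl] at hlt
    | cons y t' =>
      rw [pvRl] at hlt ⊢
      by_cases hy : y = x + 1
      · rw [if_pos hy] at hlt ⊢
        have h1 : 1 ≤ pvRl (y :: t') := pvRl_pos y t'
        have h2 : pvRl (y :: t') < (y :: t').length := by
          simp only [List.length_cons] at hlt ⊢; omega
        have := ih h2
        have e1 : pvRl (y :: t') + 1 - 1 = (pvRl (y :: t') - 1) + 1 := by omega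
        rw [e1, List.getD_cons_succ, List.getD_cons_succ]
        exact this
      · rw [if_neg hy] at hlt ⊢
        simpa using hy


theorem pvRl_drop : ∀ (l : List Int) (k : Nat), k < pvRl l → pvRl (l.drop k) = pvRl l - k := by
  intro l
  induction l with
  | nil => intro k hk; simp [pvRl] at hk
  | cons x t ih =>
    intro k hk
    cases k with
    | zero => simp
    | succ k' =>
      cases t with
      | nil => simp only [pvRl] at hk; omega
      | cons y t' =>
        rw [pvRl] at hk ⊢
        by_cases hy : y = x + 1
        · rw [if_pos hy] at hk ⊢
          have := ih k' (by omega)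
          simpa using this
        · rw [if_neg hy] at hk
          omega


-- continuation run length
def pvRlc (prev : Int) : List Int → Nat
  | [] => 0
  | x :: t => if x = prev + 1 then pvRlc x t + 1 else 0

theorem pvRl_cons (x : Int) (t : List Int) : pvRl (x :: t) = 1 + pvRlc x t := by
  induction t generalizing x with
  | nil => simp [pvRl, pvRlc]
  | cons y t' ih =>
    rw [pvRl, pvRlc]
    by_cases hy : y = x + 1
    · rw [if_pos hy, if_pos hy, ih y]; omega
    · rw [if_neg hy, if_neg hy]


-- decomposition of pvGoB along the current segment
theorem pvGoB_eq (n : Int) : ∀ (xs : List Int) (prev run c : Int),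
    pvGoB n prev xs run c =
      c + PySem.Int.floordiv (run + (pvRlc prev xs : Int)) n
        + count_consecutive_sets_alt (xs.drop (pvRlc prev xs)) n := by
  intro xs
  induction xs with
  | nil => intro prev run c; simp [pvGoB, pvRlc, count_consecutive_sets_alt]
  | cons x t ih =>
    intro prev run c
    rw [pvGoB, pvRlc]
    by_cases h : x = prev + 1
    · rw [if_pos h, if_pos (by simp [h] : (x == prev + 1) = true), ih]
      have e : run + 1 + (pvRlc x t : Int) = run + ((pvRlc x t + 1 : Nat) : Int) := by
        push_cast; ring
      rw [List.drop_succ_cons, e]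
    · rw [if_neg h, if_neg (by simp [h] : ¬ (x == prev + 1) = true), ih]
      have e2 : count_consecutive_sets_alt (x :: t) n =
          PySem.Int.floordiv (1 + (pvRlc x t : Int)) n
            + count_consecutive_sets_alt (t.drop (pvRlc x t)) n := by
        rw [count_consecutive_sets_alt, ih]; ring
      simp only [List.drop_zero, Nat.cast_zero, add_zero, e2]
      ring

theorem pvB_eq (n : Int) (l : List Int) (hl : l ≠ []) :
    count_consecutive_sets_alt l n =
      PySem.Int.floordiv (pvRl l : Int) n + count_consecutive_sets_alt (l.drop (pvRl l)) n := by
  cases l with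
  | nil => exact absurd rfl hl
  | cons x t =>
    rw [count_consecutive_sets_alt, pvGoB_eq, pvRl_cons, Nat.add_comm 1 (pvRlc x t),
      List.drop_succ_cons]
    have e : (1 : Int) + (pvRlc x t : Int) = ((pvRlc x t + 1 : Nat) : Int) := by push_cast; ring
    rw [e]; ring

-- the window check holds at 0 iff the head run has length ≥ n
theorem pvCheckA_iff (l : List Int) (m : Nat) (hm : 1 ≤ m) (hlen : m ≤ l.length) :
    pvCheckA l (m : Int) 0 = true ↔ m ≤ pvRl l := by
  have hck : pvCheckA l (m : Int) 0 = true ↔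
      ∀ k : Nat, k < m → l.getD k 0 = l.getD 0 0 + (k : Int) := by
    rw [pvCheckA, PySem.List.pyRange_one]
    simp only [sub_zero, Int.toNat_natCast, List.all_map, List.all_eq_true, List.mem_range,
      Function.comp, zero_add, beq_iff_eq, PySem.List.pyGetD_natCast, PySem.List.pyGetD_zero]
  rw [hck]
  constructor
  · intro h
    by_contra hlt
    push Not at hlt
    have hr1 : 1 ≤ pvRl l := by
      cases l with
      | nil => simp at hlen; omega
      | cons x t => exact pvRl_pos x t
    have hb := pvRl_break l (by omega)
    have h1 := h (pvRl l) (by omega)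
    have h2 := h (pvRl l - 1) (by omega)
    apply hb
    rw [h1, h2]
    have e : ((pvRl l - 1 : Nat) : Int) = (pvRl l : Int) - 1 := by omega
    rw [e]; ring
  · intro h k hk
    exact pvRl_getD l k (by omega)

-- the loop at index i is the loop at index 0 on the dropped suffix
theorem pvGetD_shift (hand : List Int) (i j : Int) (hi : 0 ≤ i) (hj : 0 ≤ j) :
    PySem.List.pyGetD hand (i + j) 0 = PySem.List.pyGetD (hand.drop i.toNat) j 0 := by
  rw [PySem.List.pyGetD_of_nonneg hand 0 (by omega : (0:Int) ≤ i + j),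
    PySem.List.pyGetD_of_nonneg (hand.drop i.toNat) 0 hj,
    List.getD_eq_getElem?_getD, List.getD_eq_getElem?_getD, List.getElem?_drop]
  congr 2
  omega

theorem pvCheckA_shift (hand : List Int) (n i : Int) (hi : 0 ≤ i) :
    pvCheckA hand n i = pvCheckA (hand.drop i.toNat) n 0 := by
  rw [pvCheckA, pvCheckA, Bool.eq_iff_iff, List.all_eq_true, List.all_eq_true]
  have e0 : PySem.List.pyGetD hand i 0 = PySem.List.pyGetD (hand.drop i.toNat) 0 0 := by
    have := pvGetD_shift hand i 0 hi le_rfl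
    rwa [add_zero] at this
  constructor
  · intro h j hj
    have hj0 : 0 ≤ j := (PySem.List.mem_pyRange_one.mp hj).1
    have := h j hj
    rw [zero_add, ← pvGetD_shift hand i j hi hj0, ← e0]
    exact this
  · intro h j hj
    have hj0 : 0 ≤ j := (PySem.List.mem_pyRange_one.mp hj).1
    have := h j hj
    rw [zero_add, ← pvGetD_shift hand i j hi hj0, ← e0] at this
    exact this

theorem pvGoA_shift (n : Int) (hn : 1 ≤ n) : ∀ (fuel : Nat) (hand : List Int) (i c : Int), 0 ≤ i →
    pvGoA hand n fuel i c = pvGoA (hand.drop i.toNat) n fuel 0 c := by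
  intro fuel
  induction fuel with
  | zero => intro hand i c hi; rfl
  | succ f ih =>
    intro hand i c hi
    rw [pvGoA, pvGoA]
    have hlen : (hand.drop i.toNat).length = hand.length - i.toNat := List.length_drop
    have hgiff : (0 ≤ ((hand.drop i.toNat).length : Int) - n) ↔ (i ≤ (hand.length : Int) - n) := by
      rw [hlen]; omega
    rw [pvCheckA_shift hand n i hi]
    by_cases hg : i ≤ (hand.length : Int) - n
    · rw [if_pos hg, if_pos (hgiff.mpr hg)]
      by_cases hc : pvCheckA (hand.drop i.toNat) n 0 = true
      · rw [if_pos hc, if_pos hc, ih hand (i + n) (c + 1) (by omega),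
          ih (hand.drop i.toNat) (0 + n) (c + 1) (by omega), List.drop_drop]
        congr 2
        omega
      · rw [if_neg hc, if_neg hc, ih hand (i + 1) c (by omega),
          ih (hand.drop i.toNat) (0 + 1) c (by omega), List.drop_drop]
        congr 2
        omega
    · rw [if_neg hg, if_neg (fun hx => hg (hgiff.mp hx))]

theorem pvB_zero (m : Nat) (hm : 1 ≤ m) : ∀ (k : Nat) (l : List Int), l.length ≤ k → l.length < m →
    count_consecutive_sets_alt l (m : Int) = 0 := by
  intro k
  induction k with
  | zero =>
    intro l h1 _
    cases l with
    | nil => rfl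
    | cons x t => simp at h1
  | succ k ih =>
    intro l h1 h2
    cases l with
    | nil => rfl
    | cons x t =>
      rw [pvB_eq (m : Int) (x :: t) (by simp)]
      have hr1 := pvRl_pos x t
      have hrle := pvRl_le_length (x :: t)
      have hfd : PySem.Int.floordiv ((pvRl (x :: t) : Nat) : Int) (m : Int) = 0 := by
        rw [PySem.Int.floordiv_natCast]
        have : pvRl (x :: t) / m = 0 := Nat.div_eq_of_lt (by omega)
        rw [this]; rfl
      rw [hfd, ih ((x :: t).drop (pvRl (x :: t))) (by rw [List.length_drop]; omega)
        (by rw [List.length_drop]; omega)]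
      ring

theorem pvB_step_take (m : Nat) (hm : 1 ≤ m) (l : List Int) (hlen : m ≤ l.length)
    (h : m ≤ pvRl l) :
    count_consecutive_sets_alt l (m : Int) = 1 + count_consecutive_sets_alt (l.drop m) (m : Int) := by
  have hl : l ≠ [] := by intro he; rw [he] at hlen; simp at hlen; omega
  rw [pvB_eq (m : Int) l hl]
  rcases Nat.eq_or_lt_of_le h with he | hlt
  · rw [← he, PySem.Int.floordiv_natCast, Nat.div_self (by omega)]
    norm_num
  · have hrle := pvRl_le_length l
    have hd : l.drop m ≠ [] := by
      have : (l.drop m).length = l.length - m := List.length_drop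
      intro he'; rw [he'] at this; simp at this; omega
    rw [pvB_eq (m : Int) (l.drop m) hd, pvRl_drop l m hlt, List.drop_drop]
    have e1 : m + (pvRl l - m) = pvRl l := by omega
    rw [e1, PySem.Int.floordiv_natCast, PySem.Int.floordiv_natCast,
      Nat.div_eq_sub_div (by omega) (by omega)]
    push_cast
    ring

theorem pvB_step_skip (m : Nat) (hm : 1 ≤ m) (l : List Int) (hl : l ≠ []) (h : pvRl l < m) :
    count_consecutive_sets_alt l (m : Int) = count_consecutive_sets_alt (l.drop 1) (m : Int) := by
  have hr1 : 1 ≤ pvRl l := by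
    cases l with
    | nil => exact absurd rfl hl
    | cons x t => exact pvRl_pos x t
  have hrle := pvRl_le_length l
  rw [pvB_eq (m : Int) l hl, PySem.Int.floordiv_natCast, Nat.div_eq_of_lt h]
  rcases Nat.eq_or_lt_of_le hr1 with he | hlt
  · rw [← he]; norm_num
  · have hd : l.drop 1 ≠ [] := by
      have : (l.drop 1).length = l.length - 1 := List.length_drop
      intro he'; rw [he'] at this; simp at this; omega
    rw [pvB_eq (m : Int) (l.drop 1) hd, pvRl_drop l 1 hlt, List.drop_drop,
      PySem.Int.floordiv_natCast, Nat.div_eq_of_lt (by omega)]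
    have e1 : 1 + (pvRl l - 1) = pvRl l := by omega
    rw [e1]

theorem pvCore (m : Nat) (hm : 1 ≤ m) : ∀ (fuel : Nat) (l : List Int) (c : Int), l.length < fuel →
    pvGoA l (m : Int) fuel 0 c = c + count_consecutive_sets_alt l (m : Int) := by
  intro fuel
  induction fuel with
  | zero => intro l c h; omega
  | succ f ih =>
    intro l c hf
    rw [pvGoA]
    by_cases hg : (0 : Int) ≤ (l.length : Int) - (m : Int)
    · rw [if_pos hg]
      have hlen : m ≤ l.length := by omega
      have hm' : (1 : Int) ≤ (m : Int) := by exact_mod_cast hm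
      by_cases hc : pvCheckA l (m : Int) 0 = true
      · rw [if_pos hc, pvGoA_shift (m : Int) hm' f l (0 + (m : Int)) (c + 1) (by omega)]
        have e : ((0 : Int) + (m : Int)).toNat = m := by omega
        rw [e, ih (l.drop m) (c + 1) (by rw [List.length_drop]; omega),
          pvB_step_take m hm l hlen ((pvCheckA_iff l m hm hlen).mp hc)]
        ring
      · rw [if_neg hc, pvGoA_shift (m : Int) hm' f l (0 + 1) c (by omega)]
        have e : ((0 : Int) + 1).toNat = 1 := by omega
        have hl : l ≠ [] := by intro he; rw [he] at hlen; simp at hlen; omega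
        have hck := (pvCheckA_iff l m hm hlen).not.mp hc
        rw [e, ih (l.drop 1) c (by rw [List.length_drop]; omega),
          pvB_step_skip m hm l hl (by omega)]
    · rw [if_neg hg, pvB_zero m hm l.length l le_rfl (by omega)]
      ring

-- ===== VERDICT (by name: the statement is the Claim_ definition above) =====
theorem count_consecutive_sets_spec : Claim_equal_count_consecutive_sets := by
  intro hand n _ hpre
  unfold Spec_count_consecutive_sets count_consecutive_sets
  have hn : 1 ≤ n := hpre
  obtain ⟨m, rfl⟩ : ∃ m : Nat, n = (m : Int) := ⟨n.toNat, by omega⟩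
  have hm : 1 ≤ m := by exact_mod_cast hn
  have := pvCore m hm (hand.length + 1) hand 0 (by omega)
  omega
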